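-- pv_equiv track=rewrite | github.com/kraftwerk28/advent-of-code | 2021/12.py | part1
-- ===== SOURCE A (Python) =====
-- def is_small(cave):
--     return cave.islower() and cave != "start" and cave != "end"
--
-- def part1(nodes):
--     def ways_to_cave(cave, visited_small=None):
--         if visited_small is None:
--             visited_small = [cave]
--         if cave == "start":
--             return 1
--         incoming = []
--         new_visited_small = visited_small[:]
--         for edge in nodes:
--             a, b = edge
--             if cave == a:
--                 adj = b
--             elif cave == b:
--                 adj = a
--             else:
--                 continue
--             if adj in visited_small:
--                 continue
--             incoming.append(adj)
--         if is_small(cave):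
--             new_visited_small.append(cave)
--         return sum(
--             ways_to_cave(c, visited_small=new_visited_small)
--             for c in incoming
--         )
--     return ways_to_cave("end")
-- ===== SOURCE B (Python) =====
-- def is_small(cave):
--     return cave.islower() and cave != "start" and cave != "end"
--
-- def part1(nodes):
--     adj = {}
--     for a, b in nodes:
--         adj.setdefault(a, []).append(b)
--         if a != b:
--             adj.setdefault(b, []).append(a)
--     total = 0
--     stack = [("end", ("end",))]
--     while stack:
--         cave, visited = stack.pop()
--         if cave == "start":
--             total += 1
--             continue
--         nv = visited + ((cave,) if is_small(cave) else ())
--         for nb in adj.get(cave, ()):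
--             if nb not in visited:
--                 stack.append((nb, nv))
--     return total
-- ===== Notes on version B (the rewrite author's own statement) =====
-- stated objective: alternative
-- what changed: A re-scans the whole edge list inside every call of an end-to-start recursion; B builds an adjacency dict once and replaces the recursion by an iterative explicit-stack traversal with a counter.
-- outside the precondition, e.g. on part1([('end', 'a'), ('A', 'B')]): A returns 0, B returns 0
import Mathlib
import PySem

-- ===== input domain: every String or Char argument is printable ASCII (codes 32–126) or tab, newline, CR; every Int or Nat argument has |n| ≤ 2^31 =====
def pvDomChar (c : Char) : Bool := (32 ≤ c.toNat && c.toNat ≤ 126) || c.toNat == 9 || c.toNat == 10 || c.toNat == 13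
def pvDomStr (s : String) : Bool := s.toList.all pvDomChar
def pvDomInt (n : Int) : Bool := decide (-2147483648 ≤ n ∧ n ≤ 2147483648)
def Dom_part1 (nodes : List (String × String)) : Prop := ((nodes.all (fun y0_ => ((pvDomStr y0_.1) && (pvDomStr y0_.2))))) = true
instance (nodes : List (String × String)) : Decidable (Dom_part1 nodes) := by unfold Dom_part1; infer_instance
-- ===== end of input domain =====

-- B replaces A's per-call scan of the whole edge list and recursive backward count by an
-- adjacency dict built once plus an iterative explicit-stack traversal (alternative decomposition).

-- ===== PORT A =====

-- s.islower() : at least one lowercase letter and no uppercase letter — exact on the ASCII domain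
def pyIslower (s : String) : Bool :=
  s.toList.any PySem.Chars.islower && !(s.toList.any PySem.Chars.isupper)

def isSmall (cave : String) : Bool :=
  pyIslower cave && !(cave == "start") && !(cave == "end")

-- the 'for edge in nodes' loop building 'incoming'
def scanEdges (nodes : List (String × String)) (cave : String) (visited : List String) :
    List String :=
  match nodes with
  | [] => []
  | p :: rest =>
    if cave == p.1 then
      (if visited.contains p.2 then scanEdges rest cave visited
       else p.2 :: scanEdges rest cave visited)
    else if cave == p.2 then
      (if visited.contains p.1 then scanEdges rest cave visited
       else p.1 :: scanEdges rest cave visited)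
    else scanEdges rest cave visited

-- ways_to_cave; the fuel only makes the Python recursion total (it never runs out inside Pre_)
def waysA (nodes : List (String × String)) : Nat → String → List String → Int
  | 0, _, _ => 0
  | fuel + 1, cave, visited =>
    if cave == "start" then 1
    else
      let incoming := scanEdges nodes cave visited
      let newVisited := visited ++ (if isSmall cave then [cave] else [])
      (incoming.map (fun c => waysA nodes fuel c newVisited)).sum

def part1 (nodes : List (String × String)) : Int :=
  waysA nodes (8 * nodes.length + 6) "end" ["end"]

-- ===== PORT B =====

-- adj = {}; for a, b in nodes: adj.setdefault(a, []).append(b); if a != b: adj.setdefault(b, []).append(a)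
def buildAdj (nodes : List (String × String)) : PySem.Dict String (List String) :=
  nodes.foldl
    (fun d p =>
      let d1 := d.modify p.1 [] (· ++ [p.2])
      if p.1 == p.2 then d1 else d1.modify p.2 [] (· ++ [p.1]))
    PySem.Dict.empty

-- the while-stack loop; fuel only makes it total (never exhausted inside Pre_)
def loopB (adjD : PySem.Dict String (List String)) :
    Nat → List (String × List String) → Int → Int
  | 0, _, total => total
  | _ + 1, [], total => total
  | fuel + 1, (cave, visited) :: rest, total =>
    if cave == "start" then loopB adjD fuel rest (total + 1)
    else
      let nv := visited ++ (if isSmall cave then [cave] else [])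
      let rest' := ((adjD.getD cave []).filter (fun nb => !(visited.contains nb))).foldl
        (fun st nb => (nb, nv) :: st) rest
      loopB adjD fuel rest' total

def part1_alt (nodes : List (String × String)) : Int :=
  loopB (buildAdj nodes) ((nodes.length + 2) ^ (8 * nodes.length + 6)) [("end", ["end"])] 0

-- ===== PRECONDITION & SPEC =====
-- Pre_ excludes edge lists that both touch "end" and contain an edge whose two endpoints are
-- non-lowercase (big) caves: on such inputs A's unbounded recursion can revisit the two big
-- caves forever and never return (e.g. it recurses forever on [("end","A"),("A","B")]).
def Pre_part1 (nodes : List (String × String)) : Prop :=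
  (∀ p ∈ nodes, (pyIslower p.1 || pyIslower p.2) = true) ∨
  (∀ p ∈ nodes, p.1 ≠ "end" ∧ p.2 ≠ "end")
instance (nodes : List (String × String)) : Decidable (Pre_part1 nodes) := by
  unfold Pre_part1; infer_instance

def pvWitness_part1 : (List (String × String)) :=
  [("start", "A"), ("A", "c"), ("c", "end")]

def Spec_part1 (nodes : List (String × String)) (out : Int) : Prop := out = part1_alt nodes
instance (nodes : List (String × String)) (out : Int) : Decidable (Spec_part1 nodes out) := by
  unfold Spec_part1; infer_instance

-- ===== CLAIM (what is proved, stated in full; the proofs are below) =====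
def Claim_equal_part1 : Prop :=
  ∀ (nodes : List (String × String)), Dom_part1 nodes → Pre_part1 nodes →
    Spec_part1 nodes (part1 nodes)

-- ===== LEMMAS AND PROOFS =====

-- partners nodes c: the unfiltered neighbour list of c, one entry per matching edge, in edge order
def partners (nodes : List (String × String)) (c : String) : List String :=
  nodes.flatMap (fun p => if c == p.1 then [p.2] else if c == p.2 then [p.1] else [])

-- recursion-tree size of A's search, used only to bound B's loop iterations
def sizeA (nodes : List (String × String)) : Nat → String → List String → Nat
  | 0, _, _ => 1
  | fuel + 1, cave, visited =>
    if cave == "start" then 1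
    else
      let newVisited := visited ++ (if isSmall cave then [cave] else [])
      1 + ((scanEdges nodes cave visited).map (fun c => sizeA nodes fuel c newVisited)).sum

def cavesOf (nodes : List (String × String)) : List String :=
  nodes.flatMap (fun p => [p.1, p.2])

def remSmalls (nodes : List (String × String)) (v : List String) : Finset String :=
  ((cavesOf nodes).filter (fun c => isSmall c)).toFinset \ v.toFinset

def delta (v : List String) (c : String) : Nat :=
  if c = "start" then 0
  else if c = "end" then 3
  else if isSmall c then (if c ∈ v then 3 else 1) else 2

def mu (nodes : List (String × String)) (v : List String) (c : String) : Nat :=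
  4 * (remSmalls nodes v).card + delta v c

-- membership characterisation of A's incoming list
theorem mem_scanEdges {nodes : List (String × String)} {cave x : String} {v : List String}
    (h : x ∈ scanEdges nodes cave v) :
    x ∉ v ∧ ∃ p ∈ nodes, (cave = p.1 ∧ x = p.2) ∨ (cave ≠ p.1 ∧ cave = p.2 ∧ x = p.1) := by
  induction nodes with
  | nil => simp [scanEdges] at h
  | cons p rest ih =>
    unfold scanEdges at h
    split_ifs at h with h1 h2 h3 h4 _h5 <;>
      simp only [beq_iff_eq, List.contains_eq_mem, decide_eq_true_eq, List.mem_cons] at *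
    · obtain ⟨hv, q, hq, hor⟩ := ih h; exact ⟨hv, q, Or.inr hq, hor⟩
    · rcases h with h | h
      · subst h; exact ⟨h2, p, Or.inl rfl, Or.inl ⟨h1, rfl⟩⟩
      · obtain ⟨hv, q, hq, hor⟩ := ih h; exact ⟨hv, q, Or.inr hq, hor⟩
    · obtain ⟨hv, q, hq, hor⟩ := ih h; exact ⟨hv, q, Or.inr hq, hor⟩
    · rcases h with h | h
      · subst h; exact ⟨h4, p, Or.inl rfl, Or.inr ⟨h1, h3, rfl⟩⟩
      · obtain ⟨hv, q, hq, hor⟩ := ih h; exact ⟨hv, q, Or.inr hq, hor⟩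
    · obtain ⟨hv, q, hq, hor⟩ := ih h; exact ⟨hv, q, Or.inr hq, hor⟩

theorem length_scanEdges (nodes : List (String × String)) (cave : String) (v : List String) :
    (scanEdges nodes cave v).length ≤ nodes.length := by
  induction nodes with
  | nil => simp [scanEdges]
  | cons p rest ih =>
    unfold scanEdges
    split_ifs <;> simp only [List.length_cons] <;> omega

theorem scanEdges_eq_filter (nodes : List (String × String)) (cave : String) (v : List String) :
    scanEdges nodes cave v = (partners nodes cave).filter (fun x => !(v.contains x)) := by
  induction nodes with
  | nil => simp [scanEdges, partners]
  | cons p rest ih =>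
    unfold scanEdges
    simp only [partners, List.flatMap_cons, List.filter_append] at *
    split_ifs with h1 h2 h3 h4 _h5 <;> simp_all [List.filter]

theorem getD_buildAdj (nodes : List (String × String)) (c : String) :
    (buildAdj nodes).getD c [] = partners nodes c := by
  have key : ∀ (ns : List (String × String)) (d : PySem.Dict String (List String)),
      (ns.foldl (fun d p =>
        let d1 := d.modify p.1 [] (· ++ [p.2])
        if p.1 == p.2 then d1 else d1.modify p.2 [] (· ++ [p.1])) d).getD c []
        = d.getD c [] ++ partners ns c := by
    intro ns
    induction ns with
    | nil => intro d; simp [partners]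
    | cons p rest ih =>
      intro d
      simp only [List.foldl_cons, partners, List.flatMap_cons] at *
      rw [ih]
      by_cases hpp : p.1 = p.2
      · simp only [hpp, beq_self_eq_true, if_true]
        rw [PySem.Dict.getD_modify]
        by_cases hc : c = p.2
        · simp [hc, hpp, partners]
        · simp [hc, fun h : c = p.1 => hc (h.trans hpp), partners]
      · simp only [beq_iff_eq, hpp, if_false]
        rw [PySem.Dict.getD_modify, PySem.Dict.getD_modify]
        by_cases hc1 : c = p.1
        · simp [hc1, hpp, fun h : p.1 = p.2 => hpp h, partners, hc1 ▸ hpp]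
        · by_cases hc2 : c = p.2
          · simp [hc1, hc2, Ne.symm hpp, partners, PySem.Dict.getD_modify]
          · simp [hc1, hc2, Ne.symm hpp, partners, PySem.Dict.getD_modify]
  have := key nodes PySem.Dict.empty
  simpa [buildAdj, PySem.Dict.getD_empty] using this

theorem isSmall_facts (c : String) (h : isSmall c = true) : c ≠ "start" ∧ c ≠ "end" := by
  simp only [isSmall, Bool.and_eq_true, Bool.not_eq_true', beq_eq_false_iff_ne] at h
  exact ⟨h.1.2, h.2⟩

theorem big_not_lower (c : String) (h1 : isSmall c = false) (h2 : c ≠ "start")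
    (h3 : c ≠ "end") : pyIslower c = false := by
  simpa [isSmall, h2, h3] using h1

theorem small_of_lower (c : String) (h : pyIslower c = true) (h2 : c ≠ "start")
    (h3 : c ≠ "end") : isSmall c = true := by
  simp [isSmall, h, h2, h3]

theorem delta_le (v : List String) (c : String) : delta v c ≤ 3 := by
  unfold delta; split_ifs <;> omega

theorem length_cavesOf (nodes : List (String × String)) :
    (cavesOf nodes).length = 2 * nodes.length := by
  induction nodes with
  | nil => simp [cavesOf]
  | cons p rest ih => simp only [cavesOf, List.flatMap_cons, List.length_append] at *; simp [ih]; omega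

-- the measure strictly decreases along A's recursion (under the no-big-big-edge precondition)
theorem mu_decrease {nodes : List (String × String)} {cave x : String} {v : List String}
    (hpre : ∀ p ∈ nodes, (pyIslower p.1 || pyIslower p.2) = true)
    (hend : "end" ∈ v) (hc : cave ≠ "start")
    (hx : x ∈ scanEdges nodes cave v) :
    mu nodes (v ++ (if isSmall cave then [cave] else [])) x < mu nodes v cave := by
  obtain ⟨hxv, p, hp, hor⟩ := mem_scanEdges hx
  have hxend : x ≠ "end" := fun h => hxv (h ▸ hend)
  have hlow : pyIslower p.1 = true ∨ pyIslower p.2 = true := by simpa using hpre p hp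
  have hpair : (cave = p.1 ∧ x = p.2) ∨ (cave = p.2 ∧ x = p.1) := by
    rcases hor with ⟨h1, h2⟩ | ⟨h1, h2, h3⟩
    · exact Or.inl ⟨h1, h2⟩
    · exact Or.inr ⟨h2, h3⟩
  have hcavemem : cave ∈ cavesOf nodes := by
    refine List.mem_flatMap.mpr ⟨p, hp, ?_⟩
    rcases hpair with ⟨h, _⟩ | ⟨h, _⟩ <;> simp [h]
  have hlowcx : pyIslower cave = true ∨ pyIslower x = true := by
    rcases hpair with ⟨h1, h2⟩ | ⟨h1, h2⟩
    · rw [h1, h2]; exact hlow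
    · rw [h1, h2]; exact hlow.symm
  by_cases hsc : isSmall cave = true
  · have hne := isSmall_facts cave hsc
    by_cases hcv : cave ∈ v
    · have hvf : (v ++ [cave]).toFinset = v.toFinset := by
        simp [List.toFinset_append, Finset.union_eq_left, hcv]
      have hrem : remSmalls nodes (v ++ [cave]) = remSmalls nodes v := by
        unfold remSmalls; rw [hvf]
      have hdc : delta v cave = 3 := by simp [delta, hne.1, hne.2, hsc, hcv]
      have hxc : x ≠ cave := fun h => hxv (h ▸ hcv)
      have hdx : delta (v ++ [cave]) x ≤ 2 := by
        have hxm : x ∉ v ++ [cave] := by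
          simp only [List.mem_append, List.mem_singleton]
          rintro (h | h); exact hxv h; exact hxc h
        unfold delta
        split_ifs with h1 h2 h3 h4 <;> first | omega | exact absurd h4 hxm
      simp only [mu, hsc, if_true, hrem, hdc]
      omega
    · have hcrem : cave ∈ remSmalls nodes v := by
        unfold remSmalls
        simp only [Finset.mem_sdiff, List.mem_toFinset, List.mem_filter]
        exact ⟨⟨hcavemem, by simpa using hsc⟩, hcv⟩
      have hvf : (v ++ [cave]).toFinset = insert cave v.toFinset := by
        simp [List.toFinset_append]
      have hrem : remSmalls nodes (v ++ [cave]) = (remSmalls nodes v).erase cave := by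
        unfold remSmalls; rw [hvf]; ext y
        simp only [Finset.mem_sdiff, Finset.mem_erase, Finset.mem_insert]
        tauto
      have hcard : (remSmalls nodes (v ++ [cave])).card + 1 = (remSmalls nodes v).card := by
        rw [hrem, Finset.card_erase_of_mem hcrem]
        have : 0 < (remSmalls nodes v).card := Finset.card_pos.mpr ⟨cave, hcrem⟩
        omega
      have hdc : delta v cave = 1 := by simp [delta, hne.1, hne.2, hsc, hcv]
      have hdx := delta_le (v ++ [cave]) x
      simp only [mu, hsc, if_true, hdc]
      omega
  · have hsc' : isSmall cave = false := by simpa using hsc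
    have hvf : v ++ (if isSmall cave then [cave] else []) = v := by
      simp [hsc']
    rw [hvf]
    by_cases hce : cave = "end"
    · have hdc : delta v cave = 3 := by simp [delta, hce]
      have hdx : delta v x ≤ 2 := by
        unfold delta; split_ifs with h1 h2 h3 h4 <;> omega
      unfold mu; omega
    · have hdc : delta v cave = 2 := by simp [delta, hc, hce, hsc']
      have hlx : pyIslower x = true := by
        rcases hlowcx with h | h
        · rw [big_not_lower cave hsc' hc hce] at h; exact absurd h (by simp)
        · exact h
      have hdx : delta v x ≤ 1 := by
        by_cases hxs : x = "start"
        · simp [delta, hxs]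
        · have hxsm := small_of_lower x hlx hxs hxend
          simp [delta, hxs, hxend, hxsm, hxv]
      unfold mu; omega

theorem mu_root_lt (nodes : List (String × String)) :
    mu nodes ["end"] "end" < 8 * nodes.length + 6 := by
  have h1 : (remSmalls nodes ["end"]).card ≤ 2 * nodes.length := by
    calc (remSmalls nodes ["end"]).card
        ≤ (((cavesOf nodes).filter (fun c => isSmall c)).toFinset).card :=
          Finset.card_le_card (Finset.sdiff_subset)
      _ ≤ ((cavesOf nodes).filter (fun c => isSmall c)).length := List.toFinset_card_le _
      _ ≤ (cavesOf nodes).length := List.length_filter_le _ _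
      _ = 2 * nodes.length := length_cavesOf nodes
  have h2 : delta ["end"] "end" = 3 := by simp [delta]
  unfold mu; omega

-- the fuel is irrelevant once it exceeds the measure
theorem waysA_stable {nodes : List (String × String)}
    (hpre : ∀ p ∈ nodes, (pyIslower p.1 || pyIslower p.2) = true) :
    ∀ f₁ {f₂ : Nat} {c : String} {v : List String}, "end" ∈ v →
      mu nodes v c < f₁ → mu nodes v c < f₂ → waysA nodes f₁ c v = waysA nodes f₂ c v := by
  intro f₁
  induction f₁ using Nat.strong_induction_on with
  | _ f₁ ih =>
    intro f₂ c v hend h1 h2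
    obtain ⟨a, rfl⟩ : ∃ a, f₁ = a + 1 := ⟨f₁ - 1, by omega⟩
    obtain ⟨b, rfl⟩ : ∃ b, f₂ = b + 1 := ⟨f₂ - 1, by omega⟩
    simp only [waysA]
    by_cases hcs : c = "start"
    · simp [hcs]
    · have h0 : ¬((c == "start") = true) := by simpa using hcs
      rw [if_neg h0, if_neg h0]
      refine congrArg List.sum (List.map_congr_left fun x hx => ?_)
      have hmu := mu_decrease hpre hend hcs hx
      exact ih a (by omega) (List.mem_append_left _ hend) (by omega) (by omega)

theorem sizeA_stable {nodes : List (String × String)}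
    (hpre : ∀ p ∈ nodes, (pyIslower p.1 || pyIslower p.2) = true) :
    ∀ f₁ {f₂ : Nat} {c : String} {v : List String}, "end" ∈ v →
      mu nodes v c < f₁ → mu nodes v c < f₂ → sizeA nodes f₁ c v = sizeA nodes f₂ c v := by
  intro f₁
  induction f₁ using Nat.strong_induction_on with
  | _ f₁ ih =>
    intro f₂ c v hend h1 h2
    obtain ⟨a, rfl⟩ : ∃ a, f₁ = a + 1 := ⟨f₁ - 1, by omega⟩
    obtain ⟨b, rfl⟩ : ∃ b, f₂ = b + 1 := ⟨f₂ - 1, by omega⟩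
    simp only [sizeA]
    by_cases hcs : c = "start"
    · simp [hcs]
    · have h0 : ¬((c == "start") = true) := by simpa using hcs
      rw [if_neg h0, if_neg h0]
      refine congrArg (1 + ·) (congrArg List.sum (List.map_congr_left fun x hx => ?_))
      have hmu := mu_decrease hpre hend hcs hx
      exact ih a (by omega) (List.mem_append_left _ hend) (by omega) (by omega)

theorem sizeA_pos (nodes : List (String × String)) (f : Nat) (c : String) (v : List String) :
    1 ≤ sizeA nodes f c v := by
  cases f with
  | zero => simp [sizeA]
  | succ g => simp only [sizeA]; split_ifs <;> omega

theorem sizeA_le (nodes : List (String × String)) :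
    ∀ (f : Nat) (c : String) (v : List String),
      sizeA nodes f c v ≤ (nodes.length + 2) ^ f := by
  intro f
  induction f with
  | zero => intro c v; simp [sizeA]
  | succ g ih =>
    intro c v
    simp only [sizeA]
    by_cases h : (c == "start") = true
    · rw [if_pos h]; exact Nat.one_le_pow _ _ (by omega)
    · rw [if_neg h]
      have hX : 1 ≤ (nodes.length + 2) ^ g := Nat.one_le_pow _ _ (by omega)
      have hsum : ((scanEdges nodes c v).map
          (fun x => sizeA nodes g x (v ++ (if isSmall c then [c] else [])))).sum
            ≤ nodes.length * (nodes.length + 2) ^ g := by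
        calc _ ≤ ((scanEdges nodes c v).map
              (fun x => sizeA nodes g x (v ++ (if isSmall c then [c] else [])))).length
                * (nodes.length + 2) ^ g := by
              apply List.sum_le_card_nsmul
              intro x hx
              simp only [List.mem_map] at hx
              obtain ⟨y, _, rfl⟩ := hx
              exact ih _ _
          _ ≤ nodes.length * (nodes.length + 2) ^ g := by
              have := length_scanEdges nodes c v
              simp only [List.length_map]
              exact Nat.mul_le_mul_right _ this
      have hpow : (nodes.length + 2) ^ (g + 1)
          = nodes.length * (nodes.length + 2) ^ g + 2 * (nodes.length + 2) ^ g := by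
        rw [pow_succ]; ring
      omega

theorem foldl_push (nv : List String) (ch : List String) (rest : List (String × List String)) :
    ch.foldl (fun st nb => (nb, nv) :: st) rest
      = (ch.map (fun nb => (nb, nv))).reverse ++ rest := by
  induction ch generalizing rest with
  | nil => simp
  | cons a t ih => simp [ih]

-- the stack loop computes the sum of A's counts over its tasks
theorem loopB_spec {nodes : List (String × String)}
    (hpre : ∀ p ∈ nodes, (pyIslower p.1 || pyIslower p.2) = true) :
    ∀ (f : Nat) (stack : List (String × List String)) (total : Int),
      (∀ t ∈ stack, "end" ∈ t.2 ∧ mu nodes t.2 t.1 < 8 * nodes.length + 6) →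
      ((stack.map (fun t => sizeA nodes (8 * nodes.length + 6) t.1 t.2)).sum ≤ f) →
      loopB (buildAdj nodes) f stack total
        = total + (stack.map (fun t => waysA nodes (8 * nodes.length + 6) t.1 t.2)).sum := by
  intro f
  induction f with
  | zero =>
    intro stack total hinv hsz
    cases stack with
    | nil => simp [loopB]
    | cons t ts =>
      exfalso
      have h1 := sizeA_pos nodes (8 * nodes.length + 6) t.1 t.2
      simp only [List.map_cons, List.sum_cons] at hsz
      omega
  | succ g ih =>
    intro stack total hinv hsz
    cases stack with
    | nil => simp [loopB]
    | cons t ts =>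
      obtain ⟨c, v⟩ := t
      have hF : 8 * nodes.length + 6 = (8 * nodes.length + 5) + 1 := by omega
      obtain ⟨hend', hmu'⟩ := hinv (c, v) (by simp)
      have hend : "end" ∈ v := hend'
      have hmu : mu nodes v c < 8 * nodes.length + 6 := hmu' 
      by_cases hcs : c = "start"
      · subst hcs
        have hsz1 : sizeA nodes (8 * nodes.length + 6) "start" v = 1 := by
          rw [hF]; simp [sizeA]
        have hw1 : waysA nodes (8 * nodes.length + 6) "start" v = 1 := by
          rw [hF]; simp [waysA]
        simp only [List.map_cons, List.sum_cons, hsz1] at hsz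
        simp only [loopB, if_pos (by rfl : ("start" == "start") = true)]
        rw [ih ts (total + 1) (fun t ht => hinv t (List.mem_cons_of_mem _ ht)) (by omega)]
        simp only [List.map_cons, List.sum_cons, hw1]
        ring
      · have hch : ((buildAdj nodes).getD c []).filter (fun nb => !(v.contains nb))
            = scanEdges nodes c v := by
          rw [getD_buildAdj, ← scanEdges_eq_filter]
        have hstabS : ∀ x ∈ scanEdges nodes c v,
            sizeA nodes (8 * nodes.length + 5) x (v ++ (if isSmall c then [c] else []))
              = sizeA nodes (8 * nodes.length + 6) x (v ++ (if isSmall c then [c] else [])) := by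
          intro x hx
          have hmux := mu_decrease hpre hend hcs hx
          exact sizeA_stable hpre _ (List.mem_append_left _ hend) (by omega) (by omega)
        have hstabW : ∀ x ∈ scanEdges nodes c v,
            waysA nodes (8 * nodes.length + 5) x (v ++ (if isSmall c then [c] else []))
              = waysA nodes (8 * nodes.length + 6) x (v ++ (if isSmall c then [c] else [])) := by
          intro x hx
          have hmux := mu_decrease hpre hend hcs hx
          exact waysA_stable hpre _ (List.mem_append_left _ hend) (by omega) (by omega)
        have hsize_eq : sizeA nodes (8 * nodes.length + 6) c v
            = 1 + ((scanEdges nodes c v).map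
                (fun x => sizeA nodes (8 * nodes.length + 6) x
                  (v ++ (if isSmall c then [c] else [])))).sum := by
          rw [hF]
          have h0 : ¬((c == "start") = true) := by simpa using hcs
          simp only [sizeA]
          rw [if_neg h0]
          exact congrArg (1 + ·) (congrArg List.sum (List.map_congr_left hstabS))
        have hways_eq : waysA nodes (8 * nodes.length + 6) c v
            = ((scanEdges nodes c v).map
                (fun x => waysA nodes (8 * nodes.length + 6) x
                  (v ++ (if isSmall c then [c] else [])))).sum := by
          rw [hF]
          have h0 : ¬((c == "start") = true) := by simpa using hcs
          simp only [waysA]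
          rw [if_neg h0]
          exact congrArg List.sum (List.map_congr_left hstabW)
        have h0 : ¬((c == "start") = true) := by simpa using hcs
        simp only [loopB]
        rw [if_neg h0]
        rw [hch, foldl_push]
        rw [ih]
        · simp only [List.map_append, List.map_reverse, List.sum_append, List.sum_reverse,
            List.map_map, Function.comp_def, List.map_cons, List.sum_cons, hways_eq]
        · intro t ht
          rcases List.mem_append.mp ht with hmem | hmem
          · rw [List.mem_reverse] at hmem
            obtain ⟨x, hx, rfl⟩ := List.mem_map.mp hmem
            have hmux := mu_decrease hpre hend hcs hx
            refine ⟨List.mem_append_left _ hend, ?_⟩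
            show mu nodes (v ++ (if isSmall c then [c] else [])) x < 8 * nodes.length + 6
            omega
          · exact hinv t (List.mem_cons_of_mem _ hmem)
        · simp only [List.map_append, List.map_reverse, List.sum_append, List.sum_reverse,
            List.map_map, Function.comp_def]
          simp only [List.map_cons, List.sum_cons, hsize_eq] at hsz
          omega

theorem part1_eq_alt_of_pre1 {nodes : List (String × String)}
    (hpre : ∀ p ∈ nodes, (pyIslower p.1 || pyIslower p.2) = true) :
    part1 nodes = part1_alt nodes := by
  have hroot := mu_root_lt nodes
  have hloop := loopB_spec hpre ((nodes.length + 2) ^ (8 * nodes.length + 6))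
    [("end", ["end"])] 0
    (by intro t ht; simp only [List.mem_singleton] at ht; subst ht; exact ⟨by simp, hroot⟩)
    (by simpa using sizeA_le nodes (8 * nodes.length + 6) "end" ["end"])
  unfold part1 part1_alt
  rw [hloop]
  simp

theorem part1_eq_alt_of_noend {nodes : List (String × String)}
    (hpre : ∀ p ∈ nodes, p.1 ≠ "end" ∧ p.2 ≠ "end") :
    part1 nodes = part1_alt nodes := by
  have hpart : partners nodes "end" = [] := by
    rw [partners, List.flatMap_eq_nil_iff]
    intro p hp
    have h := hpre p hp
    simp [Ne.symm h.1, Ne.symm h.2]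
  have hscan : scanEdges nodes "end" ["end"] = [] := by
    rw [scanEdges_eq_filter, hpart]; rfl
  have hF : 8 * nodes.length + 6 = (8 * nodes.length + 5) + 1 := by omega
  obtain ⟨g, hg⟩ : ∃ g, (nodes.length + 2) ^ (8 * nodes.length + 6) = g + 1 :=
    ⟨(nodes.length + 2) ^ (8 * nodes.length + 6) - 1,
      by have := Nat.pow_pos (n := 8 * nodes.length + 6) (show 0 < nodes.length + 2 by omega); omega⟩
  unfold part1 part1_alt
  rw [hF, hg]
  simp only [waysA, loopB, if_neg (by decide : ¬ (("end" == "start") = true)), hscan,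
    getD_buildAdj, hpart, List.filter_nil, List.foldl_nil, List.map_nil, List.sum_nil]
  cases g <;> simp [loopB]

-- ===== VERDICT (by name: the statement is the Claim_ definition above) =====
theorem part1_spec : Claim_equal_part1 := by
  intro nodes _ hpre
  unfold Spec_part1
  rcases hpre with h | h
  · exact part1_eq_alt_of_pre1 h
  · exact part1_eq_alt_of_noend h
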